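-- pv_equiv track=rewrite | github.com/snucse-23-baekjoon/solutions | h-j-lim/15666.py | n_and_m
-- ===== SOURCE A (Python) =====
-- def n_and_m(n, m, possible_answers, length):
--     if length == m:
--         return possible_answers
--     else:
--         next_level = []
--         for x in possible_answers:
--             for num in range(x[-1], n):
--                 next_level.append(x + [num])
--         return n_and_m(n, m, next_level, length + 1)
-- ===== SOURCE B (Python) =====
-- def n_and_m(n, m, possible_answers, length):
--     # Enumerate, per seed, all non-decreasing suffixes directly by a pair
--     # recursion on (remaining length, starting value) instead of A's
--     # breadth-first level-by-level rebuilding of the whole frontier.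
--     if length == m:
--         return possible_answers
--     k = m - length
--
--     def ext(v, k):
--         # all non-decreasing k-tuples over [v, n), in lexicographic order
--         if k == 0:
--             return [[]]
--         if v >= n:
--             return []
--         return [[v] + t for t in ext(v, k - 1)] + ext(v + 1, k)
--
--     return [x + t for x in possible_answers for t in ext(x[-1], k)]
-- ===== Notes on version B (the rewrite author's own statement) =====
-- stated objective: alternative
-- what changed: Replaces A's breadth-first recursion that rebuilds a whole frontier level per step with a per-seed pair recursion on (remaining length, starting value) that enumerates each non-decreasing suffix directly, never materialising intermediate levels.
import Mathlib
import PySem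

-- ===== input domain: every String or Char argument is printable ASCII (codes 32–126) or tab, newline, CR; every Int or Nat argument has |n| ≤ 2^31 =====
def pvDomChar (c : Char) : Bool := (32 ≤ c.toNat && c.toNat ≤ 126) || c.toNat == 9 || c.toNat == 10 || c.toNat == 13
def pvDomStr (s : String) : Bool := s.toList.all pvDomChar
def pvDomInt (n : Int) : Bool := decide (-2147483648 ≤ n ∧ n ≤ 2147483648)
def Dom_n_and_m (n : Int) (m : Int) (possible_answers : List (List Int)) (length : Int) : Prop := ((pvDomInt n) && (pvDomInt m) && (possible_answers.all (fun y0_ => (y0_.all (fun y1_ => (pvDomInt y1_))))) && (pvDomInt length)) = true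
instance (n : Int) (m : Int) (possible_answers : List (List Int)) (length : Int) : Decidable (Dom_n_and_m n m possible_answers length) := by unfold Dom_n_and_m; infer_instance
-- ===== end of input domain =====

-- B replaces A's breadth-first frontier rebuilding with a per-seed pair recursion on
-- (remaining length, starting value) that enumerates each suffix directly (alternative decomposition).

-- ===== PORT A =====
-- the inner double loop: for x in possible_answers: for num in range(x[-1], n): next_level.append(x + [num])
def nmNextLevel (n : Int) (possible_answers : List (List Int)) : List (List Int) :=
  possible_answers.flatMap (fun x =>
    match PySem.List.pyGet? x (-1) with   -- x[-1]; none = IndexError, excluded by Pre_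
    | some last => (PySem.List.pyRange last n 1).map (fun num => x ++ [num])
    | none => [])

def n_and_m (n : Int) (m : Int) (possible_answers : List (List Int)) (length : Int) : List (List Int) :=
  if length = m then possible_answers
  else if _h : length < m then
    n_and_m n m (nmNextLevel n possible_answers) (length + 1)
  else []  -- Python diverges when length > m (infinite recursion); excluded by Pre_ — totality guard only
  termination_by (m - length).toNat
  decreasing_by omega

-- ===== PORT B =====
-- ext(v, k): all non-decreasing k-tuples over [v, n), in lexicographic order
def nmExt (n : Int) (v : Int) (k : Nat) : List (List Int) :=
  match k with
  | 0 => [([] : List Int)]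
  | j + 1 =>
    if _h : v < n then
      (nmExt n v j).map (fun t => v :: t) ++ nmExt n (v + 1) (j + 1)
    else []
  termination_by (k, (n - v).toNat)
  decreasing_by
  · exact Prod.Lex.left _ _ (Nat.lt_succ_self j)
  · exact Prod.Lex.right _ (by omega)

def n_and_m_alt (n : Int) (m : Int) (possible_answers : List (List Int)) (length : Int) : List (List Int) :=
  if length = m then possible_answers
  else if _h : length < m then
    possible_answers.flatMap (fun x =>
      match PySem.List.pyGet? x (-1) with   -- x[-1]; none = IndexError, excluded by Pre_
      | some v => (nmExt n v (m - length).toNat).map (fun t => x ++ t)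
      | none => [])
  else []  -- length > m (k < 0): ext either returns [] (every seed's last ≥ n) or recurses forever; guard for the divergent case, excluded by Pre_

-- ===== PRECONDITION & SPEC =====
-- Pre_ excludes length > m (A recurses forever, so it raises RecursionError) and, when steps remain,
-- empty seed lists (x[-1] raises IndexError in both programs).
def Pre_n_and_m (n : Int) (m : Int) (possible_answers : List (List Int)) (length : Int) : Prop :=
  length ≤ m ∧ (length < m → ∀ x ∈ possible_answers, x ≠ [])
instance (n : Int) (m : Int) (possible_answers : List (List Int)) (length : Int) : Decidable (Pre_n_and_m n m possible_answers length) := by unfold Pre_n_and_m; infer_instance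

def pvWitness_n_and_m : Int × Int × List (List Int) × Int := (3, 2, [[0], [1]], 1)

def Spec_n_and_m (n : Int) (m : Int) (possible_answers : List (List Int)) (length : Int) (out : List (List Int)) : Prop := out = n_and_m_alt n m possible_answers length
instance (n : Int) (m : Int) (possible_answers : List (List Int)) (length : Int) (out : List (List Int)) : Decidable (Spec_n_and_m n m possible_answers length out) := by unfold Spec_n_and_m; infer_instance

-- ===== CLAIM =====
def Claim_equal_n_and_m : Prop := ∀ (n : Int) (m : Int) (possible_answers : List (List Int)) (length : Int), Dom_n_and_m n m possible_answers length → Pre_n_and_m n m possible_answers length → Spec_n_and_m n m possible_answers length (n_and_m n m possible_answers length)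

-- ===== LEMMAS AND PROOFS =====

-- ext at k+1, expressed as one pass over range(v, n): B's value recursion unrolled into A's inner loop shape
theorem nmExt_succ (n : Int) (v : Int) (k : Nat) :
    nmExt n v (k + 1)
      = (PySem.List.pyRange v n 1).flatMap (fun u => (nmExt n u k).map (fun t => u :: t)) := by
  by_cases h : v < n
  · rw [PySem.List.pyRange_one_cons h]
    rw [nmExt]
    simp only [dif_pos h, List.flatMap_cons]
    congr 1
    have : (n - (v + 1)).toNat < (n - v).toNat := by omega
    exact nmExt_succ n (v + 1) k
  · rw [PySem.List.pyRange_one_eq_nil (by omega)]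
    rw [nmExt]
    simp [h]
  termination_by (n - v).toNat
  decreasing_by omega

-- the body of n_and_m_alt for a single seed
def nmAltBody (n : Int) (k : Nat) (x : List Int) : List (List Int) :=
  match PySem.List.pyGet? x (-1) with
  | some v => (nmExt n v k).map (fun t => x ++ t)
  | none => []

-- one BFS step of A on a seed, followed by B's k-suffix enumeration, equals B's (k+1)-suffix enumeration
theorem nmAltBody_step (n : Int) (x : List Int) (k : Nat) (hx : x ≠ []) :
    (match PySem.List.pyGet? x (-1) with
      | some last => (PySem.List.pyRange last n 1).map (fun num => x ++ [num])
      | none => ([] : List (List Int))).flatMap (nmAltBody n k)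
      = nmAltBody n (k + 1) x := by
  obtain ⟨v, hv⟩ : ∃ v, PySem.List.pyGet? x (-1) = some v := by
    cases x with
    | nil => exact absurd rfl hx
    | cons a t => simp [PySem.List.pyGet?, PySem.List.pyIdx?]
  have hrhs : nmAltBody n (k + 1) x
      = ((PySem.List.pyRange v n 1).flatMap (fun u => (nmExt n u k).map (fun t => u :: t))).map
          (fun t => x ++ t) := by
    simp [nmAltBody, hv, nmExt_succ]
  rw [hrhs, List.map_flatMap]
  simp only [hv, List.flatMap_map]
  refine List.flatMap_congr (fun u _ => ?_)
  simp [nmAltBody, PySem.List.pyGet?, PySem.List.pyIdx?, List.map_map, Function.comp]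

theorem nmAlt_flat (n m : Int) (pa : List (List Int)) (length : Int)
    (_hle : length ≤ m) (hne : ∀ x ∈ pa, x ≠ []) :
    n_and_m_alt n m pa length = pa.flatMap (nmAltBody n (m - length).toNat) := by
  unfold n_and_m_alt
  by_cases h : length = m
  · have hk : (m - length).toNat = 0 := by omega
    rw [if_pos h, hk]
    conv_lhs => rw [(List.flatMap_singleton' pa).symm]
    refine List.flatMap_congr (fun x hx => ?_)
    obtain ⟨v, hv⟩ : ∃ v, PySem.List.pyGet? x (-1) = some v := by
      cases hx' : x with
      | nil => exact absurd hx' (hne x hx)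
      | cons a t => simp [PySem.List.pyGet?, PySem.List.pyIdx?]
    simp [nmAltBody, hv, nmExt]
  · rw [if_neg h, dif_pos (lt_of_le_of_ne _hle (Ne.symm (fun e => h e.symm)))]
    rfl

theorem n_and_m_eq_alt (k : Nat) : ∀ (n m : Int) (pa : List (List Int)) (length : Int),
    (m - length).toNat = k → length ≤ m → (length < m → ∀ x ∈ pa, x ≠ []) →
    n_and_m n m pa length = n_and_m_alt n m pa length := by
  induction k with
  | zero =>
    intro n m pa length hk hle _
    have hm : length = m := by omega
    simp [n_and_m, n_and_m_alt, hm]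
  | succ k ih =>
    intro n m pa length hk _hle hne
    have hlt : length < m := by omega
    have hne1 := hne hlt
    have hnext : ∀ x ∈ nmNextLevel n pa, x ≠ [] := by
      intro x hx
      simp only [nmNextLevel, List.mem_flatMap] at hx
      obtain ⟨y, _, hy⟩ := hx
      cases h : PySem.List.pyGet? y (-1) with
      | none => simp [h] at hy
      | some v =>
        simp [h, List.mem_map] at hy
        obtain ⟨num, _, rfl⟩ := hy
        simp
    rw [n_and_m]
    have hne' : length ≠ m := by omega
    simp only [hne', if_false, dif_pos hlt]
    rw [ih n m (nmNextLevel n pa) (length + 1) (by omega) (by omega) (fun _ => hnext)]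
    rw [nmAlt_flat n m (nmNextLevel n pa) (length + 1) (by omega) hnext]
    rw [nmAlt_flat n m pa length (by omega) hne1]
    unfold nmNextLevel
    rw [List.flatMap_assoc, hk]
    have hk2 : (m - (length + 1)).toNat = k := by omega
    rw [hk2]
    exact List.flatMap_congr (fun x hx => nmAltBody_step n x k (hne1 x hx))

-- ===== VERDICT =====
theorem n_and_m_spec : Claim_equal_n_and_m := by
  intro n m pa length _hdom hpre
  obtain ⟨hle, hne⟩ := hpre
  exact n_and_m_eq_alt (m - length).toNat n m pa length rfl hle hne
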